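-- pv_equiv track=rewrite | github.com/sfdcale/sf-skills | shared/hooks/scripts/chain-validator.py | get_skipped_skills
-- ===== SOURCE A (Python) =====
-- from typing import Optional, Dict, Any, List
--
-- def get_skipped_skills(current_skill: str, chain_order: List[str], completed: List[str]) -> List[str]:
--     """Get skills that should have been done before this one."""
--     try:
--         current_idx = chain_order.index(current_skill)
--         skipped = []
--         for skill in chain_order[:current_idx]:
--             if skill not in completed:
--                 skipped.append(skill)
--         return skipped
--     except ValueError:
--         return []
-- ===== SOURCE B (Python) =====
-- def get_skipped_skills(current_skill, chain_order, completed):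
--     """Get skills that should have been done before this one."""
--     skipped = None  # None = current_skill not seen yet (scanning from the right)
--     for skill in reversed(chain_order):
--         if skill == current_skill:
--             skipped = []
--         elif skipped is not None and skill not in completed:
--             skipped = [skill] + skipped
--     return skipped if skipped is not None else []
-- ===== Notes on version B (the rewrite author's own statement) =====
-- stated objective: alternative
-- what changed: Traverses chain_order from the RIGHT, building the result back-to-front by prepending: hitting current_skill resets the accumulator to [], so the first (leftmost) occurrence wins; replaces .index()+slice+forward loop+try/except with a single reversed pass holding an Option-like state.
import Mathlib
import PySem

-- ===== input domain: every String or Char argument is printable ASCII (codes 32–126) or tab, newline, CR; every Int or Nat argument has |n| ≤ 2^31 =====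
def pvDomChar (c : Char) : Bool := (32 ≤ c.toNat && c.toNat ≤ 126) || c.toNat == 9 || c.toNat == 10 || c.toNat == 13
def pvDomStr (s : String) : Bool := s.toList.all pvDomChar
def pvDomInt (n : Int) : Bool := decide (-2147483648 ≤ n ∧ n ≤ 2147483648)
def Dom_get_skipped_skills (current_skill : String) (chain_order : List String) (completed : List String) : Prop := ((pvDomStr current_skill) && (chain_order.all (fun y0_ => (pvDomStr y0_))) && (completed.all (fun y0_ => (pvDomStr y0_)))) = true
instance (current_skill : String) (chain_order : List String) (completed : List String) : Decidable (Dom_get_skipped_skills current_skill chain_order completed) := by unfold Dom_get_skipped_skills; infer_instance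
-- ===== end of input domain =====

-- B traverses chain_order from the RIGHT, building the result back-to-front by prepending;
-- reaching current_skill resets the accumulator to [], so the first occurrence wins (alternative decomposition, same cost).

-- ===== PORT A =====
def get_skipped_skills (current_skill : String) (chain_order : List String) (completed : List String) : List String :=
  match PySem.List.index? chain_order current_skill with
  | some current_idx =>
      -- for skill in chain_order[:current_idx]: if skill not in completed: skipped.append(skill)
      (PySem.List.slice chain_order none (some (current_idx : Int))).foldl
        (fun skipped skill => if skill ∈ completed then skipped else skipped ++ [skill]) []
  | none => []    -- except ValueError: return []

-- ===== PORT B =====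
-- one step of Source B's reversed loop; state: none = current_skill not seen yet
def altStep (current_skill : String) (completed : List String)
    (st : Option (List String)) (skill : String) : Option (List String) :=
  if skill == current_skill then some []
  else match st with
    | some acc => if skill ∈ completed then some acc else some (skill :: acc)
    | none => none

def get_skipped_skills_alt (current_skill : String) (chain_order : List String) (completed : List String) : List String :=
  match chain_order.reverse.foldl (altStep current_skill completed) none with
  | some l => l
  | none => []

-- ===== PRECONDITION & SPEC =====
def Spec_get_skipped_skills (current_skill : String) (chain_order : List String) (completed : List String) (out : List String) : Prop := out = get_skipped_skills_alt current_skill chain_order completed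
instance (current_skill : String) (chain_order : List String) (completed : List String) (out : List String) : Decidable (Spec_get_skipped_skills current_skill chain_order completed out) := by unfold Spec_get_skipped_skills; infer_instance

-- ===== CLAIM (what is proved, stated in full; the proofs are below) =====
def Claim_equal_get_skipped_skills : Prop := ∀ (current_skill : String) (chain_order : List String) (completed : List String), Dom_get_skipped_skills current_skill chain_order completed → Spec_get_skipped_skills current_skill chain_order completed (get_skipped_skills current_skill chain_order completed)

-- ===== LEMMAS AND PROOFS =====

-- A's inner loop is a filter of the prefix
theorem foldA_eq_filter (completed : List String) :
    ∀ (l : List String) (acc : List String),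
      l.foldl (fun s x => if x ∈ completed then s else s ++ [x]) acc
        = acc ++ l.filter (fun x => !decide (x ∈ completed)) := by
  intro l
  induction l with
  | nil => intro acc; simp
  | cons x rest ih =>
    intro acc
    by_cases hx : x ∈ completed <;> simp [List.foldl, hx, ih]

-- B's reversed fold, read as a foldr, computes the filtered prefix before the first occurrence
theorem foldB_char (c : String) (completed : List String) :
    ∀ (order : List String),
      order.foldr (fun skill st => altStep c completed st skill) none
        = (PySem.List.index? order c).map
            (fun i => (order.take i).filter (fun x => !decide (x ∈ completed))) := by
  intro order
  induction order with
  | nil => simp [PySem.List.index?]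
  | cons s rest ih =>
    by_cases hs : s = c
    · subst hs
      rw [PySem.List.index?_cons_self]
      simp [altStep]
    · rw [PySem.List.index?_cons_of_ne rest hs]
      simp only [List.foldr]
      rw [ih]
      cases h : PySem.List.index? rest c with
      | none => simp [altStep, hs]
      | some i =>
        by_cases hm : s ∈ completed <;> simp [altStep, hs, hm]

theorem get_skipped_skills_spec : Claim_equal_get_skipped_skills := by
  intro c order completed _
  unfold Spec_get_skipped_skills get_skipped_skills get_skipped_skills_alt
  rw [List.foldl_reverse, foldB_char]
  cases h : PySem.List.index? order c with
  | none => rfl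
  | some i =>
    simp only [Option.map_some]
    rw [PySem.List.slice_to_natCast, foldA_eq_filter]
    simp
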